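-- pv_equiv track=rewrite | github.com/mireiffe/D-BiCron | dbcron/jobs/pg2ch_sync.py | _unwrap_ch_type
-- ===== SOURCE A (Python) =====
-- def _unwrap_ch_type(ch_type: str) -> str:
--     """Nullable / LowCardinality 래퍼를 제거하고 기본 타입만 반환."""
--     s = ch_type
--     changed = True
--     while changed:
--         changed = False
--         for prefix in ("Nullable(", "LowCardinality("):
--             if s.startswith(prefix) and s.endswith(")"):
--                 s = s[len(prefix) : -1]
--                 changed = True
--     return s
-- ===== SOURCE B (Python) =====
-- def _unwrap_ch_type(ch_type: str) -> str:
--     """Nullable / LowCardinality 래퍼를 제거하고 기본 타입만 반환."""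
--     if ch_type.startswith("Nullable(") and ch_type.endswith(")"):
--         return _unwrap_ch_type(ch_type[9:-1])
--     if ch_type.startswith("LowCardinality(") and ch_type.endswith(")"):
--         return _unwrap_ch_type(ch_type[15:-1])
--     return ch_type
-- ===== Notes on version B (the rewrite author's own statement) =====
-- stated objective: simpler
-- what changed: Replaces the while-loop with a mutable string and a changed flag plus an inner for-loop over the two prefixes by a direct recursion that peels one wrapper per call and recurses on the inner slice.
import Mathlib
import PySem

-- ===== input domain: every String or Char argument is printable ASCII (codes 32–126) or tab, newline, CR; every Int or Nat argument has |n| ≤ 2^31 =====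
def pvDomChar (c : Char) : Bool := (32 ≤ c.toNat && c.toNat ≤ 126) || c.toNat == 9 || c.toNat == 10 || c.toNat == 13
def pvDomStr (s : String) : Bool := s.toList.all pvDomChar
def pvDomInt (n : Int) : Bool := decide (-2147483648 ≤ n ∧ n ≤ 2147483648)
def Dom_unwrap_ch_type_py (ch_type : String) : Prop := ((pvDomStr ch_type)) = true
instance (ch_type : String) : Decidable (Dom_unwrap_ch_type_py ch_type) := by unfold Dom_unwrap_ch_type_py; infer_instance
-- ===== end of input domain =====

-- B replaces A's while-loop with mutable state and a changed flag by a direct recursion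
-- peeling one wrapper per call (objective: simpler).

-- ===== PORT A =====
-- body of A's inner 'for prefix in (...)' loop: strip the prefix (and trailing ')') if it matches
def pvForBody (st : String × Bool) (p : String) : String × Bool :=
  if PySem.Str.startswith st.1 p && PySem.Str.endswith st.1 ")" then
    (PySem.Str.slice st.1 (some (p.length : Int)) (some (-1)), true)
  else st

-- one iteration of A's while-loop: 'changed = False' then the for-loop over both prefixes
def pvPass (s : String) : String × Bool :=
  ["Nullable(", "LowCardinality("].foldl pvForBody (s, false)

-- termination helper for the while-loop: a pass that set 'changed' shortened the string
theorem pvSliceLt (s : String) (k : Nat) (h : 1 ≤ s.length) :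
    (PySem.Str.slice s (some (k : Int)) (some (-1))).length < s.length := by
  have hl : (PySem.Str.slice s (some (k : Int)) (some (-1))).toList
      = PySem.List.slice s.toList (some (k : Int)) (some (-1)) := by
    simp [PySem.Str.toList_slice]
  have hlen : s.length = s.toList.length := rfl
  have : (PySem.Str.slice s (some (k : Int)) (some (-1))).length
      = (PySem.List.slice s.toList (some (k : Int)) (some (-1))).length := by
    rw [show (PySem.Str.slice s (some (k : Int)) (some (-1))).length
        = (PySem.Str.slice s (some (k : Int)) (some (-1))).toList.length from rfl, hl]
  rw [this, PySem.List.length_slice, PySem.List.clampIdx_neg_one, PySem.List.clampIdx_natCast]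
  omega

theorem pvEndLen (s : String) (h : PySem.Str.endswith s ")" = true) : 1 ≤ s.length := by
  rw [PySem.Str.endswith_eq, PySem.Chars.endswith_iff] at h
  have := h.length_le
  simpa using this

theorem pvPass_decreases (s : String) (h : (pvPass s).2 = true) :
    (pvPass s).1.length < s.length := by
  unfold pvPass pvForBody at *
  simp only [List.foldl] at *
  split_ifs at * with h1 h2 h2 <;> simp_all
  · exact lt_trans (pvSliceLt _ _ (pvEndLen _ (by simpa using h2.2)))
      (pvSliceLt _ _ (pvEndLen _ (by simpa using h1.2)))
  · exact pvSliceLt _ _ (pvEndLen _ (by simpa using h1.2))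
  · exact pvSliceLt _ _ (pvEndLen _ (by simpa using h2.2))

-- A's while-loop: repeat the pass while 'changed' is true
def pvWhile (s : String) : String :=
  let st := pvPass s
  if h : st.2 = true then pvWhile st.1 else st.1
termination_by s.length
decreasing_by exact pvPass_decreases s h

def unwrap_ch_type_py (ch_type : String) : String := pvWhile ch_type

-- ===== PORT B =====
def unwrap_ch_type_py_alt (ch_type : String) : String :=
  if h1 : PySem.Str.startswith ch_type "Nullable(" && PySem.Str.endswith ch_type ")" then
    unwrap_ch_type_py_alt (PySem.Str.slice ch_type (some 9) (some (-1)))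
  else if h2 : PySem.Str.startswith ch_type "LowCardinality(" && PySem.Str.endswith ch_type ")" then
    unwrap_ch_type_py_alt (PySem.Str.slice ch_type (some 15) (some (-1)))
  else ch_type
termination_by ch_type.length
decreasing_by
  · have := pvSliceLt ch_type 9 (pvEndLen _ (by simp_all))
    simpa using this
  · have := pvSliceLt ch_type 15 (pvEndLen _ (by simp_all))
    simpa using this

-- ===== PRECONDITION & SPEC =====
def Spec_unwrap_ch_type_py (ch_type : String) (out : String) : Prop := out = unwrap_ch_type_py_alt ch_type
instance (ch_type : String) (out : String) : Decidable (Spec_unwrap_ch_type_py ch_type out) := by unfold Spec_unwrap_ch_type_py; infer_instance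

-- ===== CLAIM (what is proved, stated in full; the proofs are below) =====
def Claim_equal_unwrap_ch_type_py : Prop := ∀ (ch_type : String), Dom_unwrap_ch_type_py ch_type → Spec_unwrap_ch_type_py ch_type (unwrap_ch_type_py ch_type)

-- ===== LEMMAS AND PROOFS =====
theorem pvLen9 : ("Nullable(" : String).length = 9 := rfl
theorem pvLen15 : ("LowCardinality(" : String).length = 15 := rfl

-- one pass of A's while-body, written out case by case
theorem pvPass_eq (s : String) :
    pvPass s =
      if PySem.Str.startswith s "Nullable(" && PySem.Str.endswith s ")" then
        (if PySem.Str.startswith (PySem.Str.slice s (some 9) (some (-1))) "LowCardinality(" &&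
            PySem.Str.endswith (PySem.Str.slice s (some 9) (some (-1))) ")" then
           (PySem.Str.slice (PySem.Str.slice s (some 9) (some (-1))) (some 15) (some (-1)), true)
         else (PySem.Str.slice s (some 9) (some (-1)), true))
      else if PySem.Str.startswith s "LowCardinality(" && PySem.Str.endswith s ")" then
        (PySem.Str.slice s (some 15) (some (-1)), true)
      else (s, false) := by
  simp only [pvPass, List.foldl, pvForBody, pvLen9, pvLen15]
  split_ifs <;> simp_all

-- a string cannot start with both wrapper prefixes
theorem pv_not_both (s : String) (h : PySem.Str.startswith s "LowCardinality(" = true) :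
    PySem.Str.startswith s "Nullable(" = false := by
  by_contra hc
  have h2 : PySem.Str.startswith s "Nullable(" = true := by
    cases hx : PySem.Str.startswith s "Nullable(" <;> simp_all
  rw [PySem.Str.startswith_eq, PySem.Chars.startswith_iff] at h h2
  rcases List.prefix_or_prefix_of_prefix h h2 with hp | hp <;> revert hp <;> decide

theorem pvWhile_eq_alt (s : String) : pvWhile s = unwrap_ch_type_py_alt s := by
  induction s using (fun motive ih s => Nat.strong_induction_on (p := fun n => ∀ t : String, t.length = n → motive t)
    s.length (fun n ihn t ht => ih t (fun u hu => ihn u.length (ht ▸ hu) u rfl)) s rfl : ∀ motive : String → Prop,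
    (∀ s : String, (∀ t : String, t.length < s.length → motive t) → motive s) → ∀ s, motive s) with
  | _ s IH =>
  rw [pvWhile]
  rw [pvPass_eq]
  by_cases hN : (PySem.Str.startswith s "Nullable(" && PySem.Str.endswith s ")") = true
  · rw [if_pos hN]
    have hNe : PySem.Str.endswith s ")" = true := (Bool.and_eq_true _ _).mp hN |>.2
    have hlt1 : (PySem.Str.slice s (some 9) (some (-1))).length < s.length := by
      have := pvSliceLt s 9 (pvEndLen _ hNe); simpa using this
    rw [unwrap_ch_type_py_alt, dif_pos hN]
    by_cases hL : (PySem.Str.startswith (PySem.Str.slice s (some 9) (some (-1))) "LowCardinality(" &&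
        PySem.Str.endswith (PySem.Str.slice s (some 9) (some (-1))) ")") = true
    · have hLs : PySem.Str.startswith (PySem.Str.slice s (some 9) (some (-1))) "LowCardinality(" = true :=
        (Bool.and_eq_true _ _).mp hL |>.1
      have hLe : PySem.Str.endswith (PySem.Str.slice s (some 9) (some (-1))) ")" = true :=
        (Bool.and_eq_true _ _).mp hL |>.2
      have hlt2 : (PySem.Str.slice (PySem.Str.slice s (some 9) (some (-1))) (some 15) (some (-1))).length
          < (PySem.Str.slice s (some 9) (some (-1))).length := by
        have := pvSliceLt _ 15 (pvEndLen _ hLe); simpa using this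
      rw [if_pos hL]
      show pvWhile (PySem.Str.slice (PySem.Str.slice s (some 9) (some (-1))) (some 15) (some (-1))) = _
      rw [IH _ (lt_trans hlt2 hlt1)]
      -- B on the Nullable-stripped string: Nullable cannot match again, LowCardinality does
      conv_rhs => rw [unwrap_ch_type_py_alt]
      rw [dif_neg (by rw [pv_not_both _ hLs]; simp), dif_pos hL]
    · rw [if_neg hL]
      show pvWhile (PySem.Str.slice s (some 9) (some (-1))) = _
      exact IH _ hlt1
  · rw [if_neg hN]
    rw [unwrap_ch_type_py_alt, dif_neg hN]
    by_cases hL : (PySem.Str.startswith s "LowCardinality(" && PySem.Str.endswith s ")") = true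
    · rw [if_pos hL]
      have hLe : PySem.Str.endswith s ")" = true := (Bool.and_eq_true _ _).mp hL |>.2
      have hlt1 : (PySem.Str.slice s (some 15) (some (-1))).length < s.length := by
        have := pvSliceLt s 15 (pvEndLen _ hLe); simpa using this
      rw [dif_pos hL]
      show pvWhile (PySem.Str.slice s (some 15) (some (-1))) = _
      exact IH _ hlt1
    · rw [if_neg hL, dif_neg hL]
      rfl

-- ===== VERDICT (by name: the statement is the Claim_ definition above) =====
theorem unwrap_ch_type_py_spec : Claim_equal_unwrap_ch_type_py := by
  intro ch_type _
  unfold Spec_unwrap_ch_type_py unwrap_ch_type_py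
  exact pvWhile_eq_alt ch_type
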